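-- pv_equiv track=rewrite | github.com/shubhamkaushal765/ac_roster | archive/new4.py | parse_availability
-- ===== SOURCE A (Python) =====
-- NUM_SLOTS = 48  # 12h shift, 15min intervals
--
-- def hhmm_to_slot(hhmm: str) -> int:
--     t = int(hhmm)
--     h = t // 100
--     m = t % 100
--     slot = (h - 10) * 4 + (m // 15)
--     return max(0, min(NUM_SLOTS - 1, slot))
--
-- def parse_availability(avail_str: str) -> list[int]:
--     slots = [-1] * NUM_SLOTS
--     intervals = [s.strip() for s in avail_str.split(",")]
--     for interval in intervals:
--         if not interval:
--             continue
--         start, end = interval.split("-")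
--         s, e = hhmm_to_slot(start), hhmm_to_slot(end)
--         for i in range(s, min(e, NUM_SLOTS)):
--             slots[i] = 1
--     return slots
-- ===== SOURCE B (Python) =====
-- NUM_SLOTS = 48  # 12h shift, 15min intervals
--
-- def hhmm_to_slot(hhmm: str) -> int:
--     t = int(hhmm)
--     h = t // 100
--     m = t % 100
--     slot = (h - 10) * 4 + (m // 15)
--     return max(0, min(NUM_SLOTS - 1, slot))
--
-- def parse_availability(avail_str: str) -> list[int]:
--     # difference table + one prefix-sum sweep instead of per-slot writes
--     diff = [0] * (NUM_SLOTS + 1)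
--     for piece in avail_str.split(","):
--         interval = piece.strip()
--         if not interval:
--             continue
--         start, end = interval.split("-")
--         lo = hhmm_to_slot(start)
--         hi = min(hhmm_to_slot(end), NUM_SLOTS)
--         if lo < hi:
--             diff[lo] += 1
--             diff[hi] -= 1
--     out = []
--     cov = 0
--     for i in range(NUM_SLOTS):
--         cov += diff[i]
--         out.append(1 if cov > 0 else -1)
--     return out
-- ===== Notes on version B (the rewrite author's own statement) =====
-- stated objective: alternative
-- what changed: Replaces A's per-slot inner loop (writing 1 into every covered slot of each interval) by a difference table updated in O(1) per interval plus a single 48-step prefix-sum sweep with a cov>0 threshold.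
import Mathlib
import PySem

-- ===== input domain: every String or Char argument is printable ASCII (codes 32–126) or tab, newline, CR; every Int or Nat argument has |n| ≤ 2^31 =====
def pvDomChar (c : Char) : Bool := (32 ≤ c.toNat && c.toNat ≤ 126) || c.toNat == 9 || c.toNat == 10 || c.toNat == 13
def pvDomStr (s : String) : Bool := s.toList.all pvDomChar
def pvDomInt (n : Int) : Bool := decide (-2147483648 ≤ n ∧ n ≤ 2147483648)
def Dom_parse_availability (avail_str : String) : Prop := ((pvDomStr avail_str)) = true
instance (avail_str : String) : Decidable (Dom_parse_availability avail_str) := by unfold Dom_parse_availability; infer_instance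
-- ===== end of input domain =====

-- B replaces A's per-slot inner writes by a difference table updated in O(1) per interval
-- plus one prefix-sum sweep over the 48 slots (alternative decomposition).

-- ===== PORT A =====
-- shared helper: Python's tuple unpacking `a, b = xs` of a list (exact where xs has two
-- elements; elsewhere Python raises ValueError — those inputs are excluded by Pre_, and
-- both ports take the `d` branch there).
def pyUnpack2 {A B : Type} (xs : List A) (f : A → A → B) (d : B) : B :=
  match xs with
  | [a, b] => f a b
  | _ => d

def NUM_SLOTS : Int := 48

def hhmm_to_slot (hhmm : String) : Int :=
  match PySem.Int.ofStr? hhmm with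
  | some t =>
      let h := PySem.Int.floordiv t 100
      let m := PySem.Int.mod t 100
      let slot := (h - 10) * 4 + PySem.Int.floordiv m 15
      max 0 (min (NUM_SLOTS - 1) slot)
  | none => 0  -- int(hhmm) raises ValueError here; Pre_ excludes such inputs

def parse_availability (avail_str : String) : List Int :=
  let slots := PySem.List.pyRepeat [(-1 : Int)] 48
  let intervals := ((PySem.Str.split? avail_str ",").getD []).map PySem.Str.strip
  intervals.foldl (fun slots interval =>
    if interval = "" then slots
    else
      pyUnpack2 ((PySem.Str.split? interval "-").getD [])
        (fun start stop =>
          let s := hhmm_to_slot start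
          let e := hhmm_to_slot stop
          (PySem.List.pyRange s (min e NUM_SLOTS) 1).foldl
            (fun slots i => PySem.List.pySetD slots i 1) slots)
        slots  -- the `slots` branch is unreachable under Pre_
    ) slots

-- ===== PORT B =====
def parse_availability_alt (avail_str : String) : List Int :=
  let diff0 := PySem.List.pyRepeat [(0 : Int)] 49
  let diff := ((PySem.Str.split? avail_str ",").getD []).foldl (fun diff piece =>
    let interval := PySem.Str.strip piece
    if interval = "" then diff
    else
      pyUnpack2 ((PySem.Str.split? interval "-").getD [])
        (fun start stop =>
          let lo := hhmm_to_slot start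
          let hi := min (hhmm_to_slot stop) NUM_SLOTS
          if lo < hi then
            let d1 := PySem.List.pySetD diff lo (PySem.List.pyGetD diff lo 0 + 1)
            PySem.List.pySetD d1 hi (PySem.List.pyGetD d1 hi 0 - 1)
          else diff)
        diff  -- the `diff` branch ('start, end = ...' raises) is unreachable under Pre_
    ) diff0
  ((PySem.List.pyRange 0 NUM_SLOTS 1).foldl
    (fun (acc : List Int × Int) i =>
      let cov := acc.2 + PySem.List.pyGetD diff i 0
      (acc.1 ++ [if cov > 0 then (1 : Int) else -1], cov)) ([], 0)).1

-- ===== PRECONDITION & SPEC =====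
-- Pre_ excludes exactly the inputs on which Python A raises: a non-empty stripped interval
-- whose '-'-split does not have exactly two parts (unpacking ValueError) or whose parts
-- int() cannot parse (ValueError).
def goodInterval (iv : String) : Bool :=
  pyUnpack2 ((PySem.Str.split? iv "-").getD [])
    (fun a b => (PySem.Int.ofStr? a).isSome && (PySem.Int.ofStr? b).isSome) false

def Pre_parse_availability (avail_str : String) : Prop :=
  ∀ p ∈ (PySem.Str.split? avail_str ",").getD [],
    PySem.Str.strip p ≠ "" → goodInterval (PySem.Str.strip p) = true

instance (avail_str : String) : Decidable (Pre_parse_availability avail_str) := by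
  unfold Pre_parse_availability; infer_instance

def pvWitness_parse_availability : String := "1000-1130, 1200-1230"

def Spec_parse_availability (avail_str : String) (out : List Int) : Prop := out = parse_availability_alt avail_str
instance (avail_str : String) (out : List Int) : Decidable (Spec_parse_availability avail_str out) := by unfold Spec_parse_availability; infer_instance

-- ===== CLAIM (what is proved, stated in full; the proofs are below) =====
def Claim_equal_parse_availability : Prop := ∀ (avail_str : String), Dom_parse_availability avail_str → Pre_parse_availability avail_str → Spec_parse_availability avail_str (parse_availability avail_str)

-- ===== LEMMAS AND PROOFS =====

/-- The pair of clamped slots an interval piece contributes, if any (shared shape of both loops). -/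
def parseIv (piece : String) : Option (Int × Int) :=
  if PySem.Str.strip piece = "" then none
  else
    pyUnpack2 ((PySem.Str.split? (PySem.Str.strip piece) "-").getD [])
      (fun a b => some (hhmm_to_slot a, hhmm_to_slot b)) none

theorem hhmm_bounds (s : String) : 0 ≤ hhmm_to_slot s ∧ hhmm_to_slot s ≤ 47 := by
  unfold hhmm_to_slot NUM_SLOTS
  cases PySem.Int.ofStr? s <;> simp [max_def, min_def] <;> split_ifs <;> omega

theorem pairs_bounds (pieces : List String) (p : Int × Int)
    (hp : p ∈ pieces.filterMap parseIv) :
    0 ≤ p.1 ∧ p.1 ≤ 47 ∧ 0 ≤ p.2 ∧ p.2 ≤ 47 := by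
  rcases List.mem_filterMap.1 hp with ⟨piece, _, h⟩
  unfold parseIv at h
  by_cases hs : PySem.Str.strip piece = ""
  · rw [if_pos hs] at h
    exact absurd h (by simp)
  · rw [if_neg hs] at h
    rcases hsp : (PySem.Str.split? (PySem.Str.strip piece) "-").getD [] with _ | ⟨a, _ | ⟨b, _ | _⟩⟩ <;>
      rw [hsp] at h
    · exact absurd h (by simp [pyUnpack2])
    · exact absurd h (by simp [pyUnpack2])
    · simp only [pyUnpack2] at h
      rcases Option.some_inj.1 h with rfl
      exact ⟨(hhmm_bounds _).1, (hhmm_bounds _).2, (hhmm_bounds _).1, (hhmm_bounds _).2⟩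
    · exact absurd h (by simp [pyUnpack2])

/-- A's per-interval action: set every slot of the clamped range to 1. -/
def markStep (slots : List Int) (p : Int × Int) : List Int :=
  (PySem.List.pyRange p.1 (min p.2 NUM_SLOTS) 1).foldl
    (fun sl i => PySem.List.pySetD sl i 1) slots

/-- B's per-interval action: bump the difference table at the two endpoints. -/
def diffStep (diff : List Int) (p : Int × Int) : List Int :=
  if p.1 < min p.2 NUM_SLOTS then
    let d1 := PySem.List.pySetD diff p.1 (PySem.List.pyGetD diff p.1 0 + 1)
    PySem.List.pySetD d1 (min p.2 NUM_SLOTS) (PySem.List.pyGetD d1 (min p.2 NUM_SLOTS) 0 - 1)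
  else diff

theorem lemA_fold (avail_str : String) :
    parse_availability avail_str =
      (((PySem.Str.split? avail_str ",").getD []).filterMap parseIv).foldl markStep
        (PySem.List.pyRepeat [(-1 : Int)] 48) := by
  unfold parse_availability
  rw [List.foldl_map, List.foldl_filterMap]
  apply PySem.List.foldl_congr_mem
  intro slots piece _
  by_cases h : PySem.Str.strip piece = ""
  · simp [parseIv, h]
  · simp only [parseIv, markStep, h, ite_false]
    rcases hsp : (PySem.Str.split? (PySem.Str.strip piece) "-").getD [] with _ | ⟨a, _ | ⟨b, _ | _⟩⟩ <;>
      simp [pyUnpack2]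

theorem lemB_fold (avail_str : String) :
    parse_availability_alt avail_str =
      ((PySem.List.pyRange 0 NUM_SLOTS 1).foldl
        (fun (acc : List Int × Int) i =>
          let cov := acc.2 + PySem.List.pyGetD
            ((((PySem.Str.split? avail_str ",").getD []).filterMap parseIv).foldl diffStep
              (PySem.List.pyRepeat [(0 : Int)] 49)) i 0
          (acc.1 ++ [if cov > 0 then (1 : Int) else -1], cov)) ([], 0)).1 := by
  unfold parse_availability_alt
  simp only []
  have hdiff : ((PySem.Str.split? avail_str ",").getD []).foldl (fun diff piece =>
      if PySem.Str.strip piece = "" then diff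
      else
        pyUnpack2 ((PySem.Str.split? (PySem.Str.strip piece) "-").getD [])
          (fun start stop =>
            if hhmm_to_slot start < min (hhmm_to_slot stop) NUM_SLOTS then
              PySem.List.pySetD
                (PySem.List.pySetD diff (hhmm_to_slot start)
                  (PySem.List.pyGetD diff (hhmm_to_slot start) 0 + 1))
                (min (hhmm_to_slot stop) NUM_SLOTS)
                (PySem.List.pyGetD
                    (PySem.List.pySetD diff (hhmm_to_slot start)
                      (PySem.List.pyGetD diff (hhmm_to_slot start) 0 + 1))
                    (min (hhmm_to_slot stop) NUM_SLOTS) 0 - 1)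
            else diff)
          diff
      ) (PySem.List.pyRepeat [(0 : Int)] 49) =
      (((PySem.Str.split? avail_str ",").getD []).filterMap parseIv).foldl diffStep
        (PySem.List.pyRepeat [(0 : Int)] 49) := by
    rw [List.foldl_filterMap]
    apply PySem.List.foldl_congr_mem
    intro diff piece _
    by_cases h : PySem.Str.strip piece = ""
    · simp [parseIv, h]
    · simp only [parseIv, diffStep, h, ite_false]
      rcases hsp : (PySem.Str.split? (PySem.Str.strip piece) "-").getD [] with _ | ⟨a, _ | ⟨b, _ | _⟩⟩ <;>
        simp [pyUnpack2]
  rw [hdiff]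

theorem getD_set_int (l : List Int) (i k : Nat) (a : Int) :
    (l.set i a).getD k 0 = if i = k ∧ i < l.length then a else l.getD k 0 := by
  simp only [List.getD, List.getElem?_set]
  by_cases h1 : i = k
  · subst h1
    by_cases h2 : i < l.length
    · simp [h2]
    · have hnone : l[i]? = none := List.getElem?_eq_none (by omega)
      simp [h2, hnone]
  · simp [h1]

theorem setRange (n : Nat) : ∀ (s e : Int), (e - s).toNat = n → 0 ≤ s →
    ∀ (slots : List Int), e ≤ (slots.length : Int) →
    ((PySem.List.pyRange s e 1).foldl (fun sl i => PySem.List.pySetD sl i 1) slots).length = slots.length ∧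
    ∀ k : Nat, ((PySem.List.pyRange s e 1).foldl (fun sl i => PySem.List.pySetD sl i 1) slots).getD k 0 =
      if s ≤ (k : Int) ∧ (k : Int) < e then 1 else slots.getD k 0 := by
  induction n with
  | zero =>
    intro s e hn hs slots he
    rw [PySem.List.pyRange_one_eq_nil (by omega)]
    exact ⟨rfl, fun k => by rw [List.foldl_nil, if_neg (by omega)]⟩
  | succ n ih =>
    intro s e hn hs slots he
    rw [PySem.List.pyRange_one_cons (by omega)]
    simp only [List.foldl_cons]
    rw [PySem.List.pySetD_of_nonneg slots 1 hs]
    obtain ⟨ih1, ih2⟩ := ih (s + 1) e (by omega) (by omega) (slots.set s.toNat 1)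
      (by simpa using he)
    refine ⟨by rw [ih1]; simp, fun k => ?_⟩
    rw [ih2 k, getD_set_int]
    by_cases hk : s.toNat = k ∧ s.toNat < slots.length
    · rw [if_pos hk, if_neg (by omega), if_pos (by omega)]
    · rw [if_neg hk]
      by_cases h1 : s + 1 ≤ (k : Int) ∧ (k : Int) < e
      · rw [if_pos h1, if_pos (by omega)]
      · rw [if_neg h1, if_neg (by omega)]

theorem markAll (ps : List (Int × Int)) :
    ∀ (slots : List Int), slots.length = 48 → (∀ p ∈ ps, 0 ≤ p.1) →
    (ps.foldl markStep slots).length = 48 ∧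
    ∀ k : Nat, (ps.foldl markStep slots).getD k 0 =
      if ps.any (fun p => decide (p.1 ≤ (k : Int) ∧ (k : Int) < min p.2 NUM_SLOTS)) then 1
      else slots.getD k 0 := by
  induction ps with
  | nil => intro slots hlen _; exact ⟨hlen, fun k => by simp⟩
  | cons p ps ih =>
    intro slots hlen hb
    simp only [List.foldl_cons]
    have hm := setRange (min p.2 NUM_SLOTS - p.1).toNat p.1 (min p.2 NUM_SLOTS) rfl
      (hb p (by simp)) slots (by unfold NUM_SLOTS; omega)
    obtain ⟨hm1, hm2⟩ := hm
    obtain ⟨ih1, ih2⟩ := ih (markStep slots p) (by unfold markStep; rw [hm1, hlen])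
      (fun q hq => hb q (by simp [hq]))
    refine ⟨ih1, fun k => ?_⟩
    rw [ih2 k]
    show _ = if (p :: ps).any _ then _ else _
    rw [List.any_cons]
    have : (markStep slots p).getD k 0 =
        if p.1 ≤ (k : Int) ∧ (k : Int) < min p.2 NUM_SLOTS then 1 else slots.getD k 0 := hm2 k
    by_cases h1 : ps.any (fun q => decide (q.1 ≤ (k : Int) ∧ (k : Int) < min q.2 NUM_SLOTS)) = true
    · rw [if_pos h1, if_pos (by rw [h1, Bool.or_true])]
    · rw [if_neg h1, this]
      by_cases h2 : p.1 ≤ (k : Int) ∧ (k : Int) < min p.2 NUM_SLOTS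
      · rw [if_pos h2, if_pos (by simp [h2])]
      · have hfalse : (decide (p.1 ≤ (k : Int) ∧ (k : Int) < min p.2 NUM_SLOTS) ||
            ps.any (fun q => decide (q.1 ≤ (k : Int) ∧ (k : Int) < min q.2 NUM_SLOTS))) ≠ true := by
          rw [decide_eq_false h2, Bool.false_or]
          exact h1
        rw [if_neg h2, if_neg hfalse]

theorem sum_take_set (l : List Int) : ∀ (i n : Nat) (c : Int), i < l.length →
    ((l.set i (l.getD i 0 + c)).take n).sum = (l.take n).sum + if i < n then c else 0 := by
  induction l with
  | nil => intro i n c h; simp at h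
  | cons x t ih =>
    intro i n c h
    cases i with
    | zero =>
      cases n with
      | zero => simp
      | succ n => simp [List.getD]; ring
    | succ i =>
      cases n with
      | zero => simp
      | succ n =>
        simp only [List.set_cons_succ, List.take_succ_cons, List.sum_cons, List.getD_cons_succ]
        rw [ih i n c (by simpa using h)]
        simp only [Nat.add_lt_add_iff_right]
        ring

theorem diffStep_sum (p : Int × Int) (hp : 0 ≤ p.1 ∧ p.1 ≤ 47 ∧ 0 ≤ p.2 ∧ p.2 ≤ 47)
    (diff : List Int) (hlen : diff.length = 49) :
    (diffStep diff p).length = 49 ∧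
    ∀ k : Nat, k < 48 →
      ((diffStep diff p).take (k + 1)).sum = (diff.take (k + 1)).sum +
        if p.1 ≤ (k : Int) ∧ (k : Int) < min p.2 NUM_SLOTS then 1 else 0 := by
  unfold diffStep NUM_SLOTS
  obtain ⟨h1, h2, h3, h4⟩ := hp
  by_cases hg : p.1 < min p.2 48
  · rw [if_pos hg]
    simp only []
    have hp1 : p.1 = (p.1.toNat : Int) := by omega
    have hp2 : min p.2 48 = ((min p.2 48).toNat : Int) := by omega
    have hlt : p.1.toNat < diff.length := by omega
    have hht : (min p.2 48).toNat < (diff.set p.1.toNat (diff.getD p.1.toNat 0 + 1)).length := by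
      simp; omega
    rw [hp1, hp2]
    simp only [PySem.List.pyGetD_natCast, PySem.List.pySetD_natCast]
    refine ⟨by simp [hlen], fun k hk => ?_⟩
    rw [sub_eq_add_neg,
      sum_take_set (diff.set p.1.toNat (diff.getD p.1.toNat 0 + 1)) (min p.2 48).toNat (k + 1) (-1) hht,
      sum_take_set diff p.1.toNat (k + 1) 1 hlt]
    split_ifs <;> omega
  · rw [if_neg hg]
    refine ⟨hlen, fun k hk => ?_⟩
    rw [if_neg (by omega)]
    ring

theorem diffAll (ps : List (Int × Int)) :
    ∀ (diff : List Int), diff.length = 49 →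
    (∀ p ∈ ps, 0 ≤ p.1 ∧ p.1 ≤ 47 ∧ 0 ≤ p.2 ∧ p.2 ≤ 47) →
    (ps.foldl diffStep diff).length = 49 ∧
    ∀ k : Nat, k < 48 →
      ((ps.foldl diffStep diff).take (k + 1)).sum = (diff.take (k + 1)).sum +
        (ps.countP (fun p => decide (p.1 ≤ (k : Int) ∧ (k : Int) < min p.2 NUM_SLOTS)) : Int) := by
  induction ps with
  | nil => intro diff hlen _; exact ⟨hlen, fun k _ => by simp⟩
  | cons p ps ih =>
    intro diff hlen hb
    simp only [List.foldl_cons]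
    obtain ⟨hs1, hs2⟩ := diffStep_sum p (hb p (by simp)) diff hlen
    obtain ⟨ih1, ih2⟩ := ih (diffStep diff p) hs1 (fun q hq => hb q (by simp [hq]))
    refine ⟨ih1, fun k hk => ?_⟩
    rw [ih2 k hk, hs2 k hk, List.countP_cons]
    by_cases h : p.1 ≤ (k : Int) ∧ (k : Int) < min p.2 NUM_SLOTS
    · rw [if_pos h, if_pos (by simpa using h)]
      push_cast
      ring
    · rw [if_neg h, if_neg (by simpa using h)]
      push_cast
      ring

theorem sweep (diff : List Int) (hlen : diff.length = 49) :
    ∀ (n : Nat) (a : Int), 0 ≤ a → (a + n : Int) = 48 →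
    ∀ (l : List Int),
    ((PySem.List.pyRange a 48 1).foldl
      (fun (acc : List Int × Int) i =>
        let cov := acc.2 + PySem.List.pyGetD diff i 0
        (acc.1 ++ [if cov > 0 then (1 : Int) else -1], cov)) (l, (diff.take a.toNat).sum)).1 =
      l ++ (List.range n).map (fun j => if (diff.take (a.toNat + j + 1)).sum > 0 then (1 : Int) else -1) := by
  intro n
  induction n with
  | zero =>
    intro a ha hn l
    rw [PySem.List.pyRange_one_eq_nil (by omega)]
    simp
  | succ n ih =>
    intro a ha hn l
    rw [PySem.List.pyRange_one_cons (by omega)]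
    simp only [List.foldl_cons]
    have hget : PySem.List.pyGetD diff a 0 = diff[a.toNat] := by
      exact PySem.List.pyGetD_eq_getElem diff 0 ha (by omega)
    have hcov : (diff.take a.toNat).sum + PySem.List.pyGetD diff a 0 =
        (diff.take ((a + 1).toNat)).sum := by
      rw [hget, show (a + 1).toNat = a.toNat + 1 from by omega,
        List.sum_take_succ diff a.toNat (by omega)]
    have := ih (a + 1) (by omega) (by omega)
      (l ++ [if (diff.take a.toNat).sum + PySem.List.pyGetD diff a 0 > 0 then (1 : Int) else -1])
    rw [hcov] at this ⊢
    rw [this]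
    rw [List.append_assoc]
    congr 1
    rw [List.range_succ_eq_map]
    simp only [List.map_cons, List.map_map, List.singleton_append]
    congr 1
    · rw [show (a + 1).toNat = a.toNat + 1 from by omega]
    · apply List.map_congr_left
      intro j _
      have : (a + 1).toNat + j + 1 = a.toNat + (j + 1) + 1 := by omega
      simp [Function.comp, this, Nat.succ_eq_add_one]

theorem parse_availability_spec : Claim_equal_parse_availability := by
  unfold Claim_equal_parse_availability Spec_parse_availability
  intro avail_str _ _
  set ps := ((PySem.Str.split? avail_str ",").getD []).filterMap parseIv with hps
  have hbounds : ∀ p ∈ ps, 0 ≤ p.1 ∧ p.1 ≤ 47 ∧ 0 ≤ p.2 ∧ p.2 ≤ 47 :=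
    fun p hp => pairs_bounds _ p hp
  -- A side
  rw [lemA_fold]
  have hinit : PySem.List.pyRepeat [(-1 : Int)] 48 = List.replicate 48 (-1 : Int) := by
    rw [PySem.List.pyRepeat_singleton]; rfl
  obtain ⟨hA1, hA2⟩ := markAll ps (PySem.List.pyRepeat [(-1 : Int)] 48)
    (by rw [hinit]; simp) (fun p hp => (hbounds p hp).1)
  -- B side
  rw [lemB_fold]
  have hinit0 : PySem.List.pyRepeat [(0 : Int)] 49 = List.replicate 49 (0 : Int) := by
    rw [PySem.List.pyRepeat_singleton]; rfl
  obtain ⟨hB1, hB2⟩ := diffAll ps (PySem.List.pyRepeat [(0 : Int)] 49)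
    (by rw [hinit0]; simp) hbounds
  set dfin := ps.foldl diffStep (PySem.List.pyRepeat [(0 : Int)] 49) with hdfin
  have hsweep := sweep dfin hB1 48 0 (by omega) (by omega) []
  rw [show ((0:Int)).toNat = 0 from rfl] at hsweep
  rw [show PySem.List.pyRange 0 NUM_SLOTS 1 = PySem.List.pyRange 0 48 1 from rfl] at *
  rw [show (dfin.take 0).sum = 0 from rfl] at hsweep
  rw [hsweep, List.nil_append]
  -- both are lists of length 48; compare pointwise
  apply List.ext_getElem
  · rw [hA1]; simp
  · intro k hk1 hk2
    have hk : k < 48 := by rw [hA1] at hk1; exact hk1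
    have hgA : (ps.foldl markStep (PySem.List.pyRepeat [(-1 : Int)] 48)).getD k 0 =
        (ps.foldl markStep (PySem.List.pyRepeat [(-1 : Int)] 48))[k] :=
      List.getD_eq_getElem _ 0 hk1
    rw [← hgA, hA2 k]
    rw [List.getElem_map]
    simp only [List.getElem_range]
    have hsum : (dfin.take (0 + k + 1)).sum =
        (ps.countP (fun p => decide (p.1 ≤ (k : Int) ∧ (k : Int) < min p.2 NUM_SLOTS)) : Int) := by
      have := hB2 k hk
      rw [hdfin] at this ⊢
      rw [show (0 + k + 1) = k + 1 from by omega, this, hinit0, List.take_replicate]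
      simp
    rw [hsum, hinit]
    have hcnt : ((ps.countP (fun p => decide (p.1 ≤ (k : Int) ∧ (k : Int) < min p.2 NUM_SLOTS)) : Int) > 0) ↔
        (ps.any (fun p => decide (p.1 ≤ (k : Int) ∧ (k : Int) < min p.2 NUM_SLOTS)) = true) := by
      rw [List.any_eq_true]
      constructor
      · intro h
        have : 0 < ps.countP (fun p => decide (p.1 ≤ (k : Int) ∧ (k : Int) < min p.2 NUM_SLOTS)) := by
          exact_mod_cast h
        obtain ⟨a, ha, hpa⟩ := List.countP_pos_iff.1 this
        exact ⟨a, ha, hpa⟩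
      · intro ⟨a, ha, hpa⟩
        have : 0 < ps.countP (fun p => decide (p.1 ≤ (k : Int) ∧ (k : Int) < min p.2 NUM_SLOTS)) :=
          List.countP_pos_iff.2 ⟨a, ha, hpa⟩
        exact_mod_cast this
    by_cases h : ps.any (fun p => decide (p.1 ≤ (k : Int) ∧ (k : Int) < min p.2 NUM_SLOTS)) = true
    · rw [if_pos h, if_pos (hcnt.2 h)]
    · rw [if_neg h, if_neg (fun hc => h (hcnt.1 hc)), List.getD_eq_getElem _ 0 (by simpa using hk),
        List.getElem_replicate]
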